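-- pv_equiv track=rewrite | github.com/WCBru/Loose-Scripts | Small Challenges/Advent of Code/2019/4/b.py | get_valid_numbers
-- ===== SOURCE A (Python) =====
-- def get_valid_numbers(num, doubleDone):
--     prevInt = num % 10
--     scaledUp = num * 10
--     if num // 10000 > 0:
--         return [scaledUp + prevInt] \
--                if not doubleDone else \
--                [scaledUp + x for x in range(prevInt, 10)]
--     else:
--         output = []
--         for x in range(prevInt, 10):
--             output += get_valid_numbers(scaledUp + x, doubleDone or prevInt == x)
--         return output
-- ===== SOURCE B (Python) =====
-- def get_valid_numbers(num, doubleDone):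
--     # Same enumeration, but as an iterative DFS with an explicit worklist
--     # instead of recursion.
--     output = []
--     work = [(num, doubleDone)]
--     while work:
--         n, dd = work.pop(0)
--         p = n % 10
--         s = n * 10
--         if n // 10000 > 0:
--             if dd:
--                 output += [s + x for x in range(p, 10)]
--             else:
--                 output.append(s + p)
--         else:
--             work = [(s + x, dd or p == x) for x in range(p, 10)] + work
--     return output
-- ===== Notes on version B (the rewrite author's own statement) =====
-- stated objective: alternative
-- what changed: Replaces A's recursive DFS with an iterative loop over an explicit worklist of (number, doubleDone) frames that prepends child frames, preserving the left-to-right emission order.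
import Mathlib
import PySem

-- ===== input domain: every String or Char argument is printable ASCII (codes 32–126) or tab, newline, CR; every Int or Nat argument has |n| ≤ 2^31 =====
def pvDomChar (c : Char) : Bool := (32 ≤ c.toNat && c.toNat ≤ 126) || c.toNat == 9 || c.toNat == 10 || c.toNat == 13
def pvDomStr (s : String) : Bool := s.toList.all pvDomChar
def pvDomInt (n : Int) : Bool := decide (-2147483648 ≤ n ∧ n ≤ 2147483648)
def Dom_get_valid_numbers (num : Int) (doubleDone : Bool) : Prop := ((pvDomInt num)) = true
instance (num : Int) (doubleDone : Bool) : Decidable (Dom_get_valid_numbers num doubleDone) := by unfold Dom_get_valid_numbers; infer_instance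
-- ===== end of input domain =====

-- B replaces A's recursive DFS by an iterative loop over an explicit worklist of
-- (number, doubleDone) frames (children prepended), same output in the same order.

-- ===== PORT A =====
-- fuel only makes the Python recursion total in Lean; 6 levels always suffice for num ≥ 1
def goA : Nat → Int → Bool → List Int
  | 0, _, _ => []
  | f + 1, num, doubleDone =>
    let prevInt := PySem.Int.mod num 10
    let scaledUp := num * 10
    if PySem.Int.floordiv num 10000 > 0 then
      if !doubleDone then [scaledUp + prevInt]
      else (PySem.List.pyRange prevInt 10 1).map (fun x => scaledUp + x)
    else
      (PySem.List.pyRange prevInt 10 1).foldl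
        (fun output x => output ++ goA f (scaledUp + x) (doubleDone || decide (prevInt = x))) []

def get_valid_numbers (num : Int) (doubleDone : Bool) : List Int := goA 6 num doubleDone

-- ===== PORT B =====
-- fuel only makes the Python while-loop total in Lean; 2000 iterations always suffice for num ≥ 1
def goB : Nat → List (Int × Bool) → List Int → List Int
  | 0, _, output => output
  | _ + 1, [], output => output
  | f + 1, (n, dd) :: work, output =>
    let p := PySem.Int.mod n 10
    let s := n * 10
    if PySem.Int.floordiv n 10000 > 0 then
      if dd then goB f work (output ++ (PySem.List.pyRange p 10 1).map (fun x => s + x))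
      else goB f work (output ++ [s + p])
    else
      goB f ((PySem.List.pyRange p 10 1).map (fun x => (s + x, dd || decide (p = x))) ++ work) output

def get_valid_numbers_alt (num : Int) (doubleDone : Bool) : List Int :=
  goB 2000 [(num, doubleDone)] []

-- ===== PRECONDITION & SPEC =====
-- Pre_ excludes num ≤ 0, where the Python A recurses forever (RecursionError); B's loop never ends there either.
def Pre_get_valid_numbers (num : Int) (doubleDone : Bool) : Prop := 1 ≤ num
instance (num : Int) (doubleDone : Bool) : Decidable (Pre_get_valid_numbers num doubleDone) := by unfold Pre_get_valid_numbers; infer_instance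
def pvWitness_get_valid_numbers : Int × Bool := (123, false)

def Spec_get_valid_numbers (num : Int) (doubleDone : Bool) (out : List Int) : Prop := out = get_valid_numbers_alt num doubleDone
instance (num : Int) (doubleDone : Bool) (out : List Int) : Decidable (Spec_get_valid_numbers num doubleDone out) := by unfold Spec_get_valid_numbers; infer_instance

-- ===== CLAIM (what is proved, stated in full; the proofs are below) =====
def Claim_equal_get_valid_numbers : Prop := ∀ (num : Int) (doubleDone : Bool), Dom_get_valid_numbers num doubleDone → Pre_get_valid_numbers num doubleDone → Spec_get_valid_numbers num doubleDone (get_valid_numbers num doubleDone)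

-- ===== LEMMAS AND PROOFS =====

-- "lvl j n": j is the minimal number of digit-append levels before the 5-digit base case
def lvl (j : Nat) (n : Int) : Prop :=
  1 ≤ n ∧ 10000 ≤ 10 ^ j * n ∧ (j = 0 ∨ 10 ^ (j - 1) * n < 10000)

-- upper bound on the number of loop iterations B spends on one level-j frame with c allowed digits
def Tcost : Nat → Nat → Nat
  | 0, _ => 1
  | j + 1, c => 1 + ((List.range c).map (fun k => Tcost j (k + 1))).sum

-- iteration bound for a frame holding the number n
def fcost (j : Nat) (n : Int) : Nat := Tcost j (10 - PySem.Int.mod n 10).toNat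

theorem floordiv_pos_iff {n : Int} : PySem.Int.floordiv n 10000 > 0 ↔ 10000 ≤ n := by
  rw [PySem.Int.floordiv_eq_ediv_of_pos (by norm_num)]
  omega

theorem mod_ten_bounds (n : Int) : 0 ≤ PySem.Int.mod n 10 ∧ PySem.Int.mod n 10 < 10 := by
  rw [PySem.Int.mod_eq_emod_of_pos (by norm_num)]
  omega

theorem lvl_base {n : Int} (h : lvl 0 n) : 10000 ≤ n := by
  have := h.2.1; simpa using this

theorem lvl_succ_lt {j : Nat} {n : Int} (h : lvl (j + 1) n) : n < 10000 := by
  rcases h with ⟨h1, _, h3⟩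
  rcases h3 with h3 | h3
  · omega
  · have hp : (1 : Int) ≤ 10 ^ (j + 1 - 1) := one_le_pow₀ (by norm_num)
    nlinarith

theorem lvl_child {j : Nat} {n x : Int} (h : lvl (j + 1) n) (hx0 : 0 ≤ x) (hx9 : x ≤ 9) :
    lvl j (10 * n + x) := by
  rcases h with ⟨h1, h2, h3⟩
  refine ⟨by omega, ?_, ?_⟩
  · have he : (10 : Int) ^ (j + 1) * n = 10 ^ j * (10 * n) := by ring
    have hp : (0 : Int) ≤ 10 ^ j := by positivity
    nlinarith
  · rcases j with _ | k
    · exact Or.inl rfl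
    · right
      have h3' : (10 : Int) ^ (k + 1) * n < 10000 := by
        rcases h3 with h3 | h3
        · exact absurd h3 (by omega)
        · simpa using h3
      have hk : k ≤ 2 := by
        by_contra hk
        have h5 : (10 : Int) ^ 4 ≤ 10 ^ (k + 1) := pow_le_pow_right₀ (by norm_num) (by omega)
        have h6 : (10 : Int) ^ (k + 1) ≤ 10 ^ (k + 1) * n := le_mul_of_one_le_right (by positivity) h1
        norm_num at h5; omega
      simp only [Nat.add_sub_cancel]
      interval_cases k <;> norm_num at h3' ⊢ <;> omega

theorem lvl_exists {n : Int} (h : 1 ≤ n) : ∃ j, j ≤ 4 ∧ lvl j n := by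
  unfold lvl
  by_cases h0 : 10000 ≤ n
  · exact ⟨0, by omega, h, by simpa using h0, Or.inl rfl⟩
  by_cases h1 : 1000 ≤ n
  · refine ⟨1, by omega, h, ?_, Or.inr ?_⟩ <;> norm_num <;> omega
  by_cases h2 : 100 ≤ n
  · refine ⟨2, by omega, h, ?_, Or.inr ?_⟩ <;> norm_num <;> omega
  by_cases h3 : 10 ≤ n
  · refine ⟨3, by omega, h, ?_, Or.inr ?_⟩ <;> norm_num <;> omega
  · refine ⟨4, by omega, h, ?_, Or.inr ?_⟩ <;> norm_num <;> omega

theorem goA_base {n : Int} (f : Nat) (d : Bool) (h : 10000 ≤ n) :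
    goA (f + 1) n d =
      if !d then [n * 10 + PySem.Int.mod n 10]
      else (PySem.List.pyRange (PySem.Int.mod n 10) 10 1).map (fun x => n * 10 + x) := by
  have hc : PySem.Int.floordiv n 10000 > 0 := floordiv_pos_iff.2 h
  simp only [goA, if_pos hc]

theorem goA_rec {n : Int} (f : Nat) (d : Bool) (h1 : 1 ≤ n) (h2 : n < 10000) :
    goA (f + 1) n d =
      (PySem.List.pyRange (PySem.Int.mod n 10) 10 1).foldl
        (fun output x => output ++ goA f (n * 10 + x) (d || decide (PySem.Int.mod n 10 = x))) [] := by
  have hc : ¬ PySem.Int.floordiv n 10000 > 0 := by rw [floordiv_pos_iff]; omega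
  simp only [goA, if_neg hc]

theorem goB_base {n : Int} (f : Nat) (dd : Bool) (work : List (Int × Bool)) (out : List Int)
    (h : 10000 ≤ n) :
    goB (f + 1) ((n, dd) :: work) out =
      if dd then goB f work (out ++ (PySem.List.pyRange (PySem.Int.mod n 10) 10 1).map (fun x => n * 10 + x))
      else goB f work (out ++ [n * 10 + PySem.Int.mod n 10]) := by
  have hc : PySem.Int.floordiv n 10000 > 0 := floordiv_pos_iff.2 h
  simp only [goB, if_pos hc]

theorem goB_rec {n : Int} (f : Nat) (dd : Bool) (work : List (Int × Bool)) (out : List Int)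
    (h1 : 1 ≤ n) (h2 : n < 10000) :
    goB (f + 1) ((n, dd) :: work) out =
      goB f ((PySem.List.pyRange (PySem.Int.mod n 10) 10 1).map
               (fun x => (n * 10 + x, dd || decide (PySem.Int.mod n 10 = x))) ++ work) out := by
  have hc : ¬ PySem.Int.floordiv n 10000 > 0 := by rw [floordiv_pos_iff]; omega
  simp only [goB, if_neg hc]

theorem goB_nil (f : Nat) (out : List Int) : goB f [] out = out := by
  cases f <;> simp [goB]

-- the IH of the main induction, packaged: processing one level-j frame
def FrameOK (j : Nat) : Prop :=
  ∀ n d, lvl j n → ∀ fb rest out, fcost j n ≤ fb →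
    ∃ fb', goB fb ((n, d) :: rest) out = goB fb' rest (out ++ goA (j + 1) n d) ∧
           fb - fcost j n ≤ fb'

-- processing a list of level-j frames in sequence
theorem chain {j : Nat} (IH : FrameOK j) :
    ∀ cs : List (Int × Bool), (∀ c ∈ cs, lvl j c.1) → ∀ fb rest out,
      (cs.map (fun c => fcost j c.1)).sum ≤ fb →
      ∃ fb', goB fb (cs ++ rest) out
               = goB fb' rest (out ++ cs.flatMap (fun c => goA (j + 1) c.1 c.2)) ∧
             fb - (cs.map (fun c => fcost j c.1)).sum ≤ fb' := by
  intro cs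
  induction cs with
  | nil => intro _ fb rest out _; exact ⟨fb, by simp, by omega⟩
  | cons c cs ih =>
    intro hmem fb rest out hfb
    have hsum : ((c :: cs).map (fun c => fcost j c.1)).sum
        = fcost j c.1 + (cs.map (fun c => fcost j c.1)).sum := by simp
    obtain ⟨fb1, he1, hge1⟩ := IH c.1 c.2 (hmem c (by simp)) fb (cs ++ rest) out (by omega)
    obtain ⟨fb2, he2, hge2⟩ := ih (fun c hc => hmem c (by simp [hc])) fb1 rest
      (out ++ goA (j + 1) c.1 c.2) (by omega)
    refine ⟨fb2, ?_, by omega⟩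
    calc goB fb ((c :: cs) ++ rest) out
        = goB fb1 (cs ++ rest) (out ++ goA (j + 1) c.1 c.2) := by
          simpa using he1
      _ = goB fb2 rest ((out ++ goA (j + 1) c.1 c.2) ++ cs.flatMap (fun c => goA (j + 1) c.1 c.2)) := he2
      _ = goB fb2 rest (out ++ (c :: cs).flatMap (fun c => goA (j + 1) c.1 c.2)) := by
          simp

theorem mod_ten_of_digit {n x : Int} (hx0 : 0 ≤ x) (hx9 : x ≤ 9) :
    PySem.Int.mod (n * 10 + x) 10 = x := by
  rw [PySem.Int.mod_eq_emod_of_pos (by norm_num)]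
  omega

theorem bridge (j : Nat) : ∀ (c : Nat) (p : Int), 0 ≤ p → (10 - p).toNat = c →
    ((PySem.List.pyRange p 10 1).map (fun x => Tcost j (10 - x).toNat)).sum
      = ((List.range c).map (fun k => Tcost j (k + 1))).sum := by
  intro c
  induction c with
  | zero =>
    intro p hp hc
    have h10 : (10 : Int) ≤ p := by omega
    rw [PySem.List.pyRange_one_eq_nil h10]
    simp
  | succ c ih =>
    intro p hp hc
    have hlt : p < 10 := by omega
    rw [PySem.List.pyRange_one_cons hlt]
    simp only [List.map_cons, List.sum_cons]
    rw [ih (p + 1) (by omega) (by omega), List.range_succ]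
    simp only [List.map_append, List.sum_append, List.map_cons, List.map_nil,
      List.sum_cons, List.sum_nil]
    rw [hc]
    omega

theorem main_ind (j : Nat) :
    (∀ n d, lvl j n → ∀ f, goA (j + 1 + f) n d = goA (j + 1) n d) ∧ FrameOK j := by
  induction j with
  | zero =>
    constructor
    · intro n d hl f
      have hbase := lvl_base hl
      rw [show 0 + 1 + f = f + 1 from by omega, goA_base f d hbase,
          show (0 + 1 : Nat) = 0 + 1 from rfl, goA_base 0 d hbase]
    · intro n d hl fb rest out hfb
      have hbase := lvl_base hl
      obtain ⟨fb', rfl⟩ : ∃ fb', fb = fb' + 1 := ⟨fb - 1, by simp [fcost, Tcost] at hfb; omega⟩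
      refine ⟨fb', ?_, by simp [fcost, Tcost]⟩
      rw [goB_base fb' d rest out hbase, goA_base 0 d hbase]
      cases d <;> simp
  | succ j ih =>
    obtain ⟨ihA, ihB⟩ := ih
    have h1n : ∀ n : Int, lvl (j + 1) n → 1 ≤ n := fun n hl => hl.1
    have hmemlvl : ∀ n, lvl (j + 1) n → ∀ x ∈ PySem.List.pyRange (PySem.Int.mod n 10) 10 1,
        lvl j (n * 10 + x) := by
      intro n hl x hx
      rw [PySem.List.mem_pyRange_one] at hx
      have hp0 := (mod_ten_bounds n).1
      have := lvl_child hl (x := x) (by omega) (by omega)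
      rwa [mul_comm 10 n] at this
    constructor
    · intro n d hl f
      have hlt := lvl_succ_lt hl
      rw [show j + 1 + 1 + f = (j + 1 + f) + 1 from by omega,
          goA_rec (j + 1 + f) d (h1n n hl) hlt, goA_rec (j + 1) d (h1n n hl) hlt]
      apply PySem.List.foldl_congr_mem'
      intro x hx acc
      rw [ihA (n * 10 + x) (d || decide (PySem.Int.mod n 10 = x)) (hmemlvl n hl x hx) f]
    · intro n d hl fb rest out hfb
      have hlt := lvl_succ_lt hl
      obtain ⟨fb1, rfl⟩ : ∃ fb1, fb = fb1 + 1 :=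
        ⟨fb - 1, by simp [fcost, Tcost] at hfb; omega⟩
      rw [goB_rec fb1 d rest out (h1n n hl) hlt]
      set cs := (PySem.List.pyRange (PySem.Int.mod n 10) 10 1).map
          (fun x => (n * 10 + x, d || decide (PySem.Int.mod n 10 = x))) with hcs
      have hcost : (cs.map (fun c => fcost j c.1)).sum
          = ((List.range (10 - PySem.Int.mod n 10).toNat).map (fun k => Tcost j (k + 1))).sum := by
        rw [hcs, List.map_map]
        have h1 : ((PySem.List.pyRange (PySem.Int.mod n 10) 10 1).map
            ((fun c => fcost j c.1) ∘ fun x => (n * 10 + x, d || decide (PySem.Int.mod n 10 = x))))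
            = ((PySem.List.pyRange (PySem.Int.mod n 10) 10 1).map
                (fun x => Tcost j (10 - x).toNat)) := by
          apply List.map_congr_left
          intro x hx
          rw [PySem.List.mem_pyRange_one] at hx
          have hp0 := (mod_ten_bounds n).1
          show fcost j (n * 10 + x) = Tcost j (10 - x).toNat
          rw [fcost, mod_ten_of_digit (by omega) (by omega)]
        rw [h1, bridge j _ _ (mod_ten_bounds n).1 rfl]
      have hTc : fcost (j + 1) n
          = 1 + ((List.range (10 - PySem.Int.mod n 10).toNat).map (fun k => Tcost j (k + 1))).sum := by
        simp [fcost, Tcost]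
      obtain ⟨fb2, he2, hge2⟩ := chain ihB cs
        (by intro c hcm
            simp only [hcs, List.mem_map] at hcm
            obtain ⟨x, hx, rfl⟩ := hcm
            exact hmemlvl n hl x hx) fb1 rest out (by rw [hcost]; omega)
      refine ⟨fb2, ?_, by rw [hcost] at hge2; omega⟩
      rw [he2]
      congr 1
      rw [goA_rec (j + 1) d (h1n n hl) hlt, PySem.List.foldl_append_eq_flatMap]
      simp [hcs, List.flatMap_map]

theorem Tcost_succ_le (j c : Nat) : Tcost j c ≤ Tcost j (c + 1) := by
  cases j with
  | zero => simp [Tcost]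
  | succ j =>
    simp only [Tcost, List.range_succ, List.map_append, List.sum_append]
    omega

theorem Tcost_mono (j : Nat) {c c' : Nat} (h : c ≤ c') : Tcost j c ≤ Tcost j c' := by
  obtain ⟨d, rfl⟩ := Nat.exists_eq_add_of_le h
  clear h
  induction d with
  | zero => simp
  | succ d ih =>
    refine le_trans ih ?_
    rw [show c + (d + 1) = (c + d) + 1 from by omega]
    exact Tcost_succ_le j (c + d)

theorem fcost_le (j : Nat) (n : Int) (hj : j ≤ 4) : fcost j n ≤ 2000 := by
  have hm := mod_ten_bounds n
  have hc : (10 - PySem.Int.mod n 10).toNat ≤ 10 := by omega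
  calc fcost j n ≤ Tcost j 10 := Tcost_mono j hc
    _ ≤ 2000 := by interval_cases j <;> decide

theorem both_eq {num : Int} (d : Bool) (h : 1 ≤ num) :
    get_valid_numbers num d = get_valid_numbers_alt num d := by
  obtain ⟨j, hj4, hl⟩ := lvl_exists h
  obtain ⟨hA, hB⟩ := main_ind j
  have h6 : get_valid_numbers num d = goA (j + 1) num d := by
    unfold get_valid_numbers
    rw [show (6 : Nat) = j + 1 + (5 - j) from by omega]
    exact hA num d hl (5 - j)
  obtain ⟨fb', he, _⟩ := hB num d hl 2000 [] [] (fcost_le j num hj4)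
  unfold get_valid_numbers_alt
  rw [h6, he, goB_nil]
  simp

-- ===== VERDICT (by name: the statement is the Claim_ definition above) =====
theorem get_valid_numbers_spec : Claim_equal_get_valid_numbers := by
  intro num d _ hpre
  unfold Spec_get_valid_numbers
  exact both_eq d hpre
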